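-- pv_equiv track=rewrite | github.com/Ca-moes/FPRO | RE05/aDigits.py | adigits
-- ===== SOURCE A (Python) =====
-- def adigits(str1, str2, str3):
--     result = ''
--     listint = [int(str1), int(str2), int(str3)]
--     if (listint[0] >= listint[1]) and (listint[0] >= listint[2]):
--         if (listint[2] >= listint[1]):
--             temp = listint[1]
--             listint[1] = listint[2]
--             listint[2] = temp
--     if (listint[1] >= listint[0]) and (listint[1] >= listint[2]):
--         temp = listint[0]
--         listint[0] = listint[1]
--         listint[1] = temp
--         if (listint[2] >= listint[1]):
--             temp = listint[1]
--             listint[1] = listint[2]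
--             listint[2] = temp
--     if (listint[2] >= listint[0]) and (listint[2] >= listint[1]):
--         temp = listint[0]
--         listint[0] = listint[2]
--         listint[2] = temp
--         if (listint[2] >= listint[1]):
--             temp = listint[1]
--             listint[1] = listint[2]
--             listint[2] = temp
--     for x in listint:
--         result += str(x)
--     result = int(result)
--     if result == 0:
--         result = format(result, '03')
--     return result
-- ===== SOURCE B (Python) =====
-- def adigits(str1, str2, str3):
--     a, b, c = int(str1), int(str2), int(str3)
--     hi = max(a, b, c)
--     lo = min(a, b, c)
--     return int(str(hi) + str(a + b + c - hi - lo) + str(lo))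
-- ===== Notes on version B (the rewrite author's own statement) =====
-- stated objective: simpler
-- what changed: Replaces the three-pass conditional swap network on a mutable list and the string-accumulating loop with a closed-form max/min/sum-residue selection of the descending triple and a single concatenation.
-- outside the precondition, e.g. on adigits('0', '0', '0'): A returns '000', B returns 0
import Mathlib
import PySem

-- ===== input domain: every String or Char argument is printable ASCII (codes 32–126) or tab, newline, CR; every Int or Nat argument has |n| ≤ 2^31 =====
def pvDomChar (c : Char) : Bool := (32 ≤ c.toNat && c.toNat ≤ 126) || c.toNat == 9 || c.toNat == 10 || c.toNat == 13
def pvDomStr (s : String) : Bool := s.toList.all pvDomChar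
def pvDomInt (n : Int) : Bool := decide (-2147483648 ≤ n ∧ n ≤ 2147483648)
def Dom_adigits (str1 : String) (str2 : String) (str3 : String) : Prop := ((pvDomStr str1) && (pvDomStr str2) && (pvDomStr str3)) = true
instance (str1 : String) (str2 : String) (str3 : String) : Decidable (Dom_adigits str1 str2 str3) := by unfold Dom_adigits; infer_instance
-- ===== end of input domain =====

-- B replaces A's three-pass conditional swap network and string-accumulating loop by a
-- closed-form max/min/sum-residue selection of the descending triple (objective: simpler).


-- ===== PORT A =====
-- A's three sequential 'if' blocks over the mutable 3-element list, each re-reading the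
-- list state left by the previous block; swaps are transliterated as triple rebindings.
def pvNetA (l0 : Int) (l1 : Int) (l2 : Int) : Int × Int × Int :=
  -- if listint[0] >= listint[1] and listint[0] >= listint[2]: if listint[2] >= listint[1]: swap 1,2
  let p1 : Int × Int × Int :=
    if l0 ≥ l1 ∧ l0 ≥ l2 then (if l2 ≥ l1 then (l0, l2, l1) else (l0, l1, l2))
    else (l0, l1, l2)
  -- if listint[1] >= listint[0] and listint[1] >= listint[2]: swap 0,1; if listint[2] >= listint[1]: swap 1,2
  let p2 : Int × Int × Int :=
    if p1.2.1 ≥ p1.1 ∧ p1.2.1 ≥ p1.2.2 then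
      (if p1.2.2 ≥ p1.1 then (p1.2.1, p1.2.2, p1.1) else (p1.2.1, p1.1, p1.2.2))
    else p1
  -- if listint[2] >= listint[0] and listint[2] >= listint[1]: swap 0,2; if listint[2] >= listint[1]: swap 1,2
  if p2.2.2 ≥ p2.1 ∧ p2.2.2 ≥ p2.2.1 then
    (if p2.1 ≥ p2.2.1 then (p2.2.2, p2.1, p2.2.1) else (p2.2.2, p2.2.1, p2.1))
  else p2

def adigits (str1 : String) (str2 : String) (str3 : String) : Int :=
  -- listint = [int(str1), int(str2), int(str3)]  (int() = PySem.Int.ofStr?; none = ValueError, outside Pre_)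
  match PySem.Int.ofStr? str1, PySem.Int.ofStr? str2, PySem.Int.ofStr? str3 with
  | some a, some b, some c =>
    let l := pvNetA a b c
    -- for x in listint: result += str(x)   (string concatenation ported exactly over List Char)
    let resultChars : List Char :=
      [l.1, l.2.1, l.2.2].foldl (fun acc x => acc ++ PySem.Int.toChars x) []
    -- result = int(result)   (ValueError = none, outside Pre_)
    match PySem.Int.ofChars? resultChars with
    | some r =>
      -- if result == 0: A returns the STRING '000' (not an int) — outside Pre_; 0 stands in
      if r = 0 then 0 else r
    | none => 0
  | _, _, _ => 0

-- ===== PORT B =====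
def adigits_alt (str1 : String) (str2 : String) (str3 : String) : Int :=
  -- int() failures raise ValueError in Python (outside Pre_); Option.bind carries the happy path
  (((PySem.Int.ofStr? str1).bind fun a =>
    (PySem.Int.ofStr? str2).bind fun b =>
    (PySem.Int.ofStr? str3).bind fun c =>
      let hi := max a (max b c)
      let lo := min a (min b c)
      -- int(str(hi) + str(a + b + c - hi - lo) + str(lo))  (ported exactly over List Char)
      PySem.Int.ofChars? (PySem.Int.toChars hi ++ PySem.Int.toChars (a + b + c - hi - lo) ++ PySem.Int.toChars lo)).getD
    0)

-- ===== PRECONDITION & SPEC =====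
-- Pre_ excludes inputs on which A raises ValueError (a string int() rejects, or a negative
-- parsed value making int() of the concatenation fail) and the all-zero input, on which A
-- returns the string '000' instead of an int.
def Pre_adigits (str1 : String) (str2 : String) (str3 : String) : Prop :=
  0 ≤ (PySem.Int.ofStr? str1).getD (-1) ∧ 0 ≤ (PySem.Int.ofStr? str2).getD (-1) ∧
  0 ≤ (PySem.Int.ofStr? str3).getD (-1) ∧
  ¬((PySem.Int.ofStr? str1).getD (-1) = 0 ∧ (PySem.Int.ofStr? str2).getD (-1) = 0 ∧
    (PySem.Int.ofStr? str3).getD (-1) = 0)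
instance (str1 : String) (str2 : String) (str3 : String) : Decidable (Pre_adigits str1 str2 str3) := by unfold Pre_adigits; infer_instance
def pvWitness_adigits : String × String × String := ("1", "2", "3")

def Spec_adigits (str1 : String) (str2 : String) (str3 : String) (out : Int) : Prop := out = adigits_alt str1 str2 str3
instance (str1 : String) (str2 : String) (str3 : String) (out : Int) : Decidable (Spec_adigits str1 str2 str3 out) := by unfold Spec_adigits; infer_instance

-- ===== CLAIM (what is proved, stated in full; the proofs are below) =====
def Claim_equal_adigits : Prop := ∀ (str1 : String) (str2 : String) (str3 : String), Dom_adigits str1 str2 str3 → Pre_adigits str1 str2 str3 → Spec_adigits str1 str2 str3 (adigits str1 str2 str3)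

-- ===== LEMMAS AND PROOFS =====

-- A's swap network computes exactly B's closed-form descending triple.
set_option maxHeartbeats 2000000 in
theorem pvNetA_eq (a b c : Int) :
    pvNetA a b c =
      (max a (max b c), a + b + c - max a (max b c) - min a (min b c), min a (min b c)) := by
  unfold pvNetA
  split_ifs <;> simp_all [Prod.ext_iff] <;> try omega
  all_goals (split_ifs at * <;> simp_all <;> omega)

theorem adigits_spec' (str1 str2 str3 : String) (h : Pre_adigits str1 str2 str3) :
    adigits str1 str2 str3 = adigits_alt str1 str2 str3 := by
  obtain ⟨h1, h2, h3, _⟩ := h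
  cases e1 : PySem.Int.ofStr? str1 with
  | none => rw [e1] at h1; simp at h1
  | some a =>
  cases e2 : PySem.Int.ofStr? str2 with
  | none => rw [e2] at h2; simp at h2
  | some b =>
  cases e3 : PySem.Int.ofStr? str3 with
  | none => rw [e3] at h3; simp at h3
  | some c =>
  unfold adigits adigits_alt
  rw [e1, e2, e3]
  simp only [pvNetA_eq, List.foldl, List.nil_append, Option.bind_some]
  cases PySem.Int.ofChars?
      (PySem.Int.toChars (max a (max b c)) ++
        PySem.Int.toChars (a + b + c - max a (max b c) - min a (min b c)) ++
        PySem.Int.toChars (min a (min b c))) with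
  | none => rfl
  | some r =>
    -- A's 'if result == 0' branch is the identity on Int (the excluded '000' case aside)
    by_cases hr : r = 0 <;> simp [hr]

-- ===== VERDICT (by name: the statement is the Claim_ definition above) =====
theorem adigits_spec : Claim_equal_adigits := by
  intro str1 str2 str3 _ hpre
  exact adigits_spec' str1 str2 str3 hpre
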